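-- pv_equiv track=rewrite | github.com/nobe0716/problem_solving | codeforces/contests/1538/F. Interesting Function.py | solve
-- ===== SOURCE A (Python) =====
-- def solve(l: int, r: int) -> int:
--     def count_changes(v: int) -> int:
--         base = 1
--         count = 0
--         while v > 0:
--             count += base * (v % 10)
--             base = base * 10 + 1
--             v //= 10
--         return count
--
--     return count_changes(r) - count_changes(l)
-- ===== SOURCE B (Python) =====
-- def solve(l: int, r: int) -> int:
--     def f(v: int) -> int:
--         # digit changes from 0 to v = sum of v // p over powers of ten p <= v
--         s, p = 0, 1
--         while p <= v:
--             s += v // p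
--             p *= 10
--         return s
--
--     return f(r) - f(l)
-- ===== Notes on version B (the rewrite author's own statement) =====
-- stated objective: alternative
-- what changed: Instead of A's loop that truncates v while maintaining a repunit 'base' and a digit-weighted count, B fixes v and iterates over growing powers of ten p, summing the quotients v // p (identity: the digit-weighted repunit sum equals v + v//10 + v//100 + ...).
import Mathlib
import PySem

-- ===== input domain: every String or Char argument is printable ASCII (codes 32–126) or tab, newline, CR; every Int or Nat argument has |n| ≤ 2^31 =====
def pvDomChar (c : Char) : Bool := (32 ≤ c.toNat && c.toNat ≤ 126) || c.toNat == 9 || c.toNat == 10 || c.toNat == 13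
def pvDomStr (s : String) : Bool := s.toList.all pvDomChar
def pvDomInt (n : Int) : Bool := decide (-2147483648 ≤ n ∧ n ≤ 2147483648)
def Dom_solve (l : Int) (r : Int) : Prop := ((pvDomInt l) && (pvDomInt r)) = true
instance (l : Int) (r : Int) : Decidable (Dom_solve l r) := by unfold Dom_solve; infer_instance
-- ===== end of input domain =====

-- B keeps v fixed and loops over growing powers of ten p, summing v // p,
-- instead of A's truncation loop with a repunit 'base' weight; objective: alternative.

-- ===== PORT A =====
-- the while-loop of count_changes, state (v, base, count)
def countChangesLoop (v : Int) (base : Int) (count : Int) : Int :=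
  if h : 0 < v then
    countChangesLoop (PySem.Int.floordiv v 10) (base * 10 + 1) (count + base * (PySem.Int.mod v 10))
  else count
termination_by v.toNat
decreasing_by
  have h10 : PySem.Int.floordiv v 10 = v / 10 := PySem.Int.floordiv_eq_ediv_of_pos (by omega)
  rw [h10]; omega

def solve (l : Int) (r : Int) : Int :=
  countChangesLoop r 1 0 - countChangesLoop l 1 0

-- ===== PORT B =====
-- the while-loop of f, state (s, p); v never changes.  The proof argument 0 < p
-- only justifies termination (p strictly grows), it does not alter the computation.
def powLoop (v : Int) (s : Int) (p : Int) (hp : 0 < p) : Int :=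
  if h : p ≤ v then
    powLoop v (s + PySem.Int.floordiv v p) (p * 10) (by omega)
  else s
termination_by (v + 1 - p).toNat
decreasing_by omega

def solve_alt (l : Int) (r : Int) : Int :=
  powLoop r 0 1 (by omega) - powLoop l 0 1 (by omega)

-- ===== PRECONDITION & SPEC =====
def Spec_solve (l : Int) (r : Int) (out : Int) : Prop := out = solve_alt l r
instance (l : Int) (r : Int) (out : Int) : Decidable (Spec_solve l r out) := by unfold Spec_solve; infer_instance

-- ===== CLAIM =====
def Claim_equal_solve : Prop := ∀ (l : Int) (r : Int), Dom_solve l r → Spec_solve l r (solve l r)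

-- ===== LEMMAS AND PROOFS =====

-- proof-only bridge: the common value v + v/10 + v/100 + ... as a recursion on v
def truncSumRec (v : Int) : Int :=
  if v ≤ 0 then 0 else v + truncSumRec (v / 10)
termination_by v.toNat
decreasing_by omega

-- A's loop from state (v, b, c) returns c + b*v + (truncSumRec v - v), for v ≥ 0.
theorem countChangesLoop_eq (v : Int) (b c : Int) (hv : 0 ≤ v) :
    countChangesLoop v b c = c + b * v + (truncSumRec v - v) := by
  by_cases h : 0 < v
  · have h10 : PySem.Int.floordiv v 10 = v / 10 := PySem.Int.floordiv_eq_ediv_of_pos (by omega)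
    have hm : PySem.Int.mod v 10 = v % 10 := PySem.Int.mod_eq_emod_of_pos (by omega)
    have hv' : 0 ≤ v / 10 := by positivity
    have ih := countChangesLoop_eq (v / 10) (b * 10 + 1) (c + b * (v % 10)) hv'
    rw [countChangesLoop, dif_pos h, h10, hm, ih]
    conv_rhs => rw [truncSumRec]
    rw [if_neg (by omega : ¬ v ≤ 0)]
    linear_combination b * (Int.ediv_add_emod v 10)
  · rw [countChangesLoop, dif_neg h, truncSumRec, if_pos (by omega : v ≤ 0)]
    have : v = 0 := by omega
    simp [this]
termination_by v.toNat
decreasing_by omega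

theorem countChangesLoop_top (v : Int) : countChangesLoop v 1 0 = truncSumRec v := by
  by_cases hv : 0 ≤ v
  · have := countChangesLoop_eq v 1 0 hv; omega
  · rw [countChangesLoop, dif_neg (by omega : ¬ 0 < v), truncSumRec, if_pos (by omega : v ≤ 0)]

-- B's loop from state (s, p) returns s + truncSumRec (v / p).
theorem powLoop_eq (v s p : Int) (hp : 0 < p) :
    powLoop v s p hp = s + truncSumRec (v / p) := by
  by_cases h : p ≤ v
  · have ih := powLoop_eq v (s + PySem.Int.floordiv v p) (p * 10) (by omega)
    rw [powLoop, dif_pos h, ih, PySem.Int.floordiv_eq_ediv_of_pos hp]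
    have hdd : v / p / 10 = v / (p * 10) := Int.ediv_ediv_of_nonneg (by omega)
    conv_rhs => rw [truncSumRec]
    have hq : ¬ v / p ≤ 0 := by
      have := (Int.le_ediv_iff_mul_le (a := 1) (b := v) hp).mpr (by omega)
      omega
    rw [if_neg hq, hdd]; ring
  · rw [powLoop, dif_neg h]
    have hq : v / p ≤ 0 := by
      rcases le_or_gt v 0 with hv | hv
      · have := Int.ediv_le_ediv hp hv
        simpa using this
      · have : v / p = 0 := Int.ediv_eq_zero_of_lt (by omega) (by omega)
        omega
    rw [truncSumRec, if_pos hq]; ring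
termination_by (v + 1 - p).toNat
decreasing_by omega

theorem powLoop_top (v : Int) : powLoop v 0 1 (by omega) = truncSumRec v := by
  rw [powLoop_eq]; simp

-- ===== VERDICT =====
theorem solve_spec : Claim_equal_solve := by
  intro l r _
  unfold Spec_solve solve solve_alt
  rw [countChangesLoop_top, countChangesLoop_top, powLoop_top, powLoop_top]
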